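-- pv_equiv track=rewrite | github.com/manojscoder/DSA_for_interview | Bit Manipulation/Python/Maximum XOR for Each Query.py | getMaximumXor
-- ===== SOURCE A (Python) =====
-- from typing import List
--
-- def getMaximumXor(nums: List[int], maximumBit: int) -> List[int]:
--     XOR, mask, result = 0, (1 << maximumBit) - 1, []
--
--     for num in nums:
--         XOR ^= num
--
--     for index in range(len(nums) - 1, -1, -1):
--         result.append(XOR ^ mask)
--         XOR ^= nums[index]
--
--     return result
-- ===== SOURCE B (Python) =====
-- from typing import List
--
-- def getMaximumXor(nums: List[int], maximumBit: int) -> List[int]: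
--     mask = (1 << maximumBit) - 1
--     n = len(nums)
--     result = [0] * n
--     acc = 0
--     i = n
--     for num in nums:
--         acc ^= num
--         i -= 1
--         result[i] = acc ^ mask
--     return result
-- ===== Notes on version B (the rewrite author's own statement) =====
-- stated objective: alternative
-- what changed: B preallocates the output array and fills it back-to-front with prefix XORs in a single forward pass over nums (one loop, indexed writes), instead of A's two passes: a forward total-XOR pass and a backward indexed loop that peels elements off the running XOR while appending.
import Mathlib
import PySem

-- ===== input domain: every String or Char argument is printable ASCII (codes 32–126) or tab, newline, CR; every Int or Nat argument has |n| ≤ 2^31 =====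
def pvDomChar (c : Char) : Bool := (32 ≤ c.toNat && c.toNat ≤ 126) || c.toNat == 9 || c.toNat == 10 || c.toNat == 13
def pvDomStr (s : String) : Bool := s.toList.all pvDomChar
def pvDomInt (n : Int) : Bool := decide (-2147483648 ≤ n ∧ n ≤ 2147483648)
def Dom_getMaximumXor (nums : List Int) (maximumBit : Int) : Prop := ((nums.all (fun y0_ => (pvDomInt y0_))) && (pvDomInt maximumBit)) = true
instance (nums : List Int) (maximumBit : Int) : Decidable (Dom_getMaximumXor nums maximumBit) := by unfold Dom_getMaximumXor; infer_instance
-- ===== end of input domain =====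

-- B preallocates the output array and fills it back-to-front with prefix XORs in one forward
-- pass, replacing A's forward total-XOR pass plus backward indexed append loop (alternative
-- decomposition, same O(n) cost).


-- ===== PORT A =====
def getMaximumXor (nums : List Int) (maximumBit : Int) : List Int :=
  let mask : Int := (1 <<< maximumBit.toNat) - 1          -- (1 << maximumBit) - 1; Pre_ gives 0 ≤ maximumBit
  let XOR : Int := nums.foldl PySem.Int.bxor 0            -- for num in nums: XOR ^= num
  -- for index in range(len(nums)-1, -1, -1): result.append(XOR ^ mask); XOR ^= nums[index]
  -- (pyGetD default 0 is never used: every index produced by the range is in bounds)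
  ((PySem.List.pyRange ((nums.length : Int) - 1) (-1) (-1)).foldl
      (fun (st : Int × List Int) index =>
        (PySem.Int.bxor st.1 (PySem.List.pyGetD nums index 0),
         st.2 ++ [PySem.Int.bxor st.1 mask]))
      (XOR, ([] : List Int))).2

-- ===== PORT B =====
def getMaximumXor_alt (nums : List Int) (maximumBit : Int) : List Int :=
  let mask : Int := (1 <<< maximumBit.toNat) - 1
  -- result = [0] * n; acc = 0; i = n
  -- for num in nums: acc ^= num; i -= 1; result[i] = acc ^ mask
  -- (pySetD is exact here: i is always an in-range index of result)
  (nums.foldl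
      (fun (st : Int × Int × List Int) num =>
        let a := PySem.Int.bxor st.1 num
        (a, st.2.1 - 1, PySem.List.pySetD st.2.2 (st.2.1 - 1) (PySem.Int.bxor a mask)))
      (0, (nums.length : Int), List.replicate nums.length (0 : Int))).2.2

-- ===== PRECONDITION & SPEC =====
-- Pre_ excludes only maximumBit < 0, where Python's '1 << maximumBit' raises ValueError (in A and in B alike).
def Pre_getMaximumXor (nums : List Int) (maximumBit : Int) : Prop := 0 ≤ maximumBit
instance (nums : List Int) (maximumBit : Int) : Decidable (Pre_getMaximumXor nums maximumBit) := by unfold Pre_getMaximumXor; infer_instance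
def pvWitness_getMaximumXor : List Int × Int := ([0, 1, 1, 3], 2)
def Spec_getMaximumXor (nums : List Int) (maximumBit : Int) (out : List Int) : Prop := out = getMaximumXor_alt nums maximumBit
instance (nums : List Int) (maximumBit : Int) (out : List Int) : Decidable (Spec_getMaximumXor nums maximumBit out) := by unfold Spec_getMaximumXor; infer_instance

-- ===== CLAIM (what is proved, stated in full; the proofs are below) =====
def Claim_equal_getMaximumXor : Prop := ∀ (nums : List Int) (maximumBit : Int), Dom_getMaximumXor nums maximumBit → Pre_getMaximumXor nums maximumBit → Spec_getMaximumXor nums maximumBit (getMaximumXor nums maximumBit)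

-- ===== LEMMAS AND PROOFS =====

theorem bxor_bxor_cancel (a b : Int) : PySem.Int.bxor (PySem.Int.bxor a b) b = a := by
  unfold PySem.Int.bxor
  split_ifs <;> simp_all [Int.toNat_natCast, Nat.xor_xor_cancel_right] <;> omega

-- the prefix-XOR list (with a function of each new accumulator appended), shared shape of both proofs
def prefList (l : List Int) (a : Int) : List Int :=
  (l.foldl (fun (st : Int × List Int) num =>
      (PySem.Int.bxor st.1 num, st.2 ++ [PySem.Int.bxor st.1 num]))
    (a, ([] : List Int))).2

-- A's loop has the shape st ↦ (u st.1 i, st.2 ++ [v st.1 i]); the accumulated list distributes.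
theorem foldl_pair_split {α : Type} (u v : Int → α → Int) :
    ∀ (l : List α) (a : Int) (res : List Int),
      l.foldl (fun (st : Int × List Int) i => (u st.1 i, st.2 ++ [v st.1 i])) (a, res)
        = ((l.foldl (fun (st : Int × List Int) i => (u st.1 i, st.2 ++ [v st.1 i])) (a, [])).1,
           res ++ (l.foldl (fun (st : Int × List Int) i => (u st.1 i, st.2 ++ [v st.1 i])) (a, [])).2)
  | [], a, res => by simp
  | i :: l, a, res => by
      simp only [List.foldl_cons]
      rw [foldl_pair_split u v l (u a i) (res ++ [v a i]),
          foldl_pair_split u v l (u a i) ([] ++ [v a i])]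
      simp

theorem foldl_pair_fst {α : Type} (u v : Int → α → Int) :
    ∀ (l : List α) (a : Int) (res : List Int),
      (l.foldl (fun (st : Int × List Int) i => (u st.1 i, st.2 ++ [v st.1 i])) (a, res)).1
        = l.foldl u a
  | [], a, res => by simp
  | i :: l, a, res => by
      simp only [List.foldl_cons]
      exact foldl_pair_fst u v l (u a i) (res ++ [v a i])

theorem prefList_cons (x : Int) (l : List Int) (a : Int) :
    prefList (x :: l) a = PySem.Int.bxor a x :: prefList l (PySem.Int.bxor a x) := by
  unfold prefList
  simp only [List.foldl_cons]
  rw [foldl_pair_split (fun s n => PySem.Int.bxor s n) (fun s n => PySem.Int.bxor s n) l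
        (PySem.Int.bxor a x) ([] ++ [PySem.Int.bxor a x])]
  simp

theorem prefList_append_singleton (l : List Int) (x a : Int) :
    prefList (l ++ [x]) a
      = prefList l a ++ [PySem.Int.bxor ((l.foldl (fun (st : Int × List Int) num =>
            (PySem.Int.bxor st.1 num, st.2 ++ [PySem.Int.bxor st.1 num]))
          (a, ([] : List Int))).1) x] := by
  unfold prefList
  simp only [List.foldl_append, List.foldl_cons, List.foldl_nil]

-- A's value: the reversed prefix-XOR list, each entry xored with the mask
theorem main_eq (mask : Int) :
    ∀ nums : List Int,
      ((PySem.List.pyRange ((nums.length : Int) - 1) (-1) (-1)).foldl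
          (fun (st : Int × List Int) index =>
            (PySem.Int.bxor st.1 (PySem.List.pyGetD nums index 0),
             st.2 ++ [PySem.Int.bxor st.1 mask]))
          (nums.foldl PySem.Int.bxor 0, ([] : List Int))).2
      = (prefList nums 0).reverse.map (fun p => PySem.Int.bxor p mask) := by
  intro nums
  induction nums using List.reverseRecOn with
  | nil => simp [prefList]
  | append_singleton nums x ih =>
      simp only [List.foldl_append, List.foldl_cons, List.foldl_nil]
      set pX : Int := nums.foldl PySem.Int.bxor 0 with hpX
      have hfst : (nums.foldl (fun (st : Int × List Int) num =>
            (PySem.Int.bxor st.1 num, st.2 ++ [PySem.Int.bxor st.1 num]))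
          (0, ([] : List Int))).1 = pX :=
        foldl_pair_fst _ _ nums 0 []
      have hlen : ((nums ++ [x]).length : Int) - 1 = (nums.length : Int) := by
        simp
      rw [hlen]
      rw [PySem.List.pyRange_neg_one_cons (by omega : (-1 : Int) < (nums.length : Int))]
      simp only [List.foldl_cons, List.nil_append]
      have hget : PySem.List.pyGetD (nums ++ [x]) (nums.length : Int) 0 = x := by
        rw [PySem.List.pyGetD_natCast]
        simp [List.getD]
      rw [hget, bxor_bxor_cancel]
      have hcongr :
          (PySem.List.pyRange ((nums.length : Int) - 1) (-1) (-1)).foldl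
            (fun (st : Int × List Int) index =>
              (PySem.Int.bxor st.1 (PySem.List.pyGetD (nums ++ [x]) index 0),
               st.2 ++ [PySem.Int.bxor st.1 mask]))
            (pX, [PySem.Int.bxor (PySem.Int.bxor pX x) mask])
          = (PySem.List.pyRange ((nums.length : Int) - 1) (-1) (-1)).foldl
            (fun (st : Int × List Int) index =>
              (PySem.Int.bxor st.1 (PySem.List.pyGetD nums index 0),
               st.2 ++ [PySem.Int.bxor st.1 mask]))
            (pX, [PySem.Int.bxor (PySem.Int.bxor pX x) mask]) := by
        apply PySem.List.foldl_congr_mem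
        intro st index hmem
        have hb := (PySem.List.mem_pyRange_neg_one).mp hmem
        have h0 : (0:Int) ≤ index := by omega
        have h1 : index < (nums.length : Int) := by omega
        rw [PySem.List.pyGetD_eq_getElem (nums ++ [x]) 0 h0 (by simp; omega),
            PySem.List.pyGetD_eq_getElem nums 0 h0 h1]
        rw [List.getElem_append_left]
      rw [hcongr]
      rw [foldl_pair_split (fun a i => PySem.Int.bxor a (PySem.List.pyGetD nums i 0))
            (fun a _ => PySem.Int.bxor a mask) _ pX [PySem.Int.bxor (PySem.Int.bxor pX x) mask]]
      rw [ih]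
      rw [prefList_append_singleton]
      have hfst' : (nums.foldl (fun (st : Int × List Int) num =>
            (PySem.Int.bxor st.1 num, st.2 ++ [PySem.Int.bxor st.1 num]))
          (0, ([] : List Int))).1 = pX := foldl_pair_fst _ _ nums 0 []
      rw [hfst']
      simp

theorem drop_set_self :
    ∀ (xs : List Int) (n : ℕ) (v : Int), n < xs.length →
      (xs.set n v).drop n = v :: xs.drop (n + 1)
  | x :: xs, 0, v, _ => by simp
  | x :: xs, n + 1, v, h => by
      simp only [List.set_cons_succ, List.drop_succ_cons]
      exact drop_set_self xs n v (by simpa using h)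

-- B's loop invariant: starting at i = l.length, the fold writes the masked prefix XORs of l
-- (reversed) into the first l.length cells of res.
theorem bfold_inv (mask : Int) :
    ∀ (l : List Int) (a : Int) (res : List Int), l.length ≤ res.length →
      (l.foldl
          (fun (st : Int × Int × List Int) num =>
            let a := PySem.Int.bxor st.1 num
            (a, st.2.1 - 1, PySem.List.pySetD st.2.2 (st.2.1 - 1) (PySem.Int.bxor a mask)))
          (a, (l.length : Int), res)).2.2
        = ((prefList l a).map (fun p => PySem.Int.bxor p mask)).reverse ++ res.drop l.length
  | [], a, res, _ => by simp [prefList]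
  | x :: l, a, res, h => by
      simp only [List.foldl_cons]
      have hl : ((x :: l).length : Int) - 1 = (l.length : Int) := by
        simp
      have hset : PySem.List.pySetD res (((x :: l).length : Int) - 1)
            (PySem.Int.bxor (PySem.Int.bxor a x) mask)
          = res.set l.length (PySem.Int.bxor (PySem.Int.bxor a x) mask) := by
        rw [hl, PySem.List.pySetD_natCast]
      have hlen : l.length ≤ (res.set l.length (PySem.Int.bxor (PySem.Int.bxor a x) mask)).length := by
        simp at h ⊢; omega
      rw [hset, hl]
      rw [bfold_inv mask l (PySem.Int.bxor a x) _ hlen]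
      rw [drop_set_self res l.length _ (by simp at h; omega)]
      rw [prefList_cons]
      simp

-- ===== VERDICT (by name: the statement is the Claim_ definition above) =====
theorem getMaximumXor_spec : Claim_equal_getMaximumXor := by
  intro nums maximumBit _ _
  unfold Spec_getMaximumXor getMaximumXor getMaximumXor_alt
  simp only []
  rw [main_eq ((1 <<< maximumBit.toNat) - 1) nums,
      bfold_inv ((1 <<< maximumBit.toNat) - 1) nums 0 (List.replicate nums.length 0) (by simp)]
  simp [List.map_reverse]
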